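-- pv_equiv track=rewrite | github.com/jinit24/Scrabble-bot | og_bot_1.py | get_word_on_top
-- ===== SOURCE A (Python) =====
-- def get_word_on_top(board, start_point):
--
-- 	x,y = start_point
-- 	s = ""
--
-- 	for i in range(x, -1, -1):
-- 		if(board[i][y] == " "):
-- 			break
-- 		else:
-- 			s  = board[i][y] + s
--
-- 	return s
--
-- board =  [[" " for x in range(15)] for y in range(15)]
-- ===== SOURCE B (Python) =====
-- def get_word_on_top(board, start_point):
--     x, y = start_point
--     lo = x
--     while lo >= 0 and board[lo][y] != " ":
--         lo -= 1
--     return "".join(board[i][y] for i in range(lo + 1, x + 1))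
-- ===== Notes on version B (the rewrite author's own statement) =====
-- stated objective: alternative
-- what changed: A accumulates the word character-by-character by prepending while walking upward and breaking at a blank; B first locates the boundary row lo (last blank at or below x) with a bare scan and then builds the whole word in one join over rows lo+1..x, separating boundary-finding from word-building.
import Mathlib
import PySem

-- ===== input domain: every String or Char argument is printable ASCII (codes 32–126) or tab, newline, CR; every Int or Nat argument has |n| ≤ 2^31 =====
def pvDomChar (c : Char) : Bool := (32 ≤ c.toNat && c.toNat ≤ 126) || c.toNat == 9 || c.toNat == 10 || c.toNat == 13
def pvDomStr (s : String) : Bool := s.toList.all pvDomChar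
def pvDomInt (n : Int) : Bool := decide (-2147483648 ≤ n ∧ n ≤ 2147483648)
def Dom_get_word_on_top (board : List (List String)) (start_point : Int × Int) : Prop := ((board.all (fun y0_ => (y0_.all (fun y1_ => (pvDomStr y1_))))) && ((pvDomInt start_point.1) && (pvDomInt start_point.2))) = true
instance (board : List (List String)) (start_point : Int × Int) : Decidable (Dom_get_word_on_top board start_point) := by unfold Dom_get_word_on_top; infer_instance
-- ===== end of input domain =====

-- B replaces A's upward prepend-until-blank accumulation by a bare boundary scan followed by one
-- join over the rows above the boundary (objective: alternative decomposition, same cost).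

-- board[i][y]; under Pre_ both lookups of every cell either port reads are in range, so the
-- defaults are never used
def pvCell (board : List (List String)) (y i : Int) : String :=
  ((PySem.List.pyGet? board i).getD []) |> fun row => (PySem.List.pyGet? row y).getD ""

-- ===== PORT A =====
-- A's loop: for i in range(x, -1, -1): if board[i][y] == " ": break else: s = board[i][y] + s
def pvLoopA (board : List (List String)) (y : Int) : List Int → String → String
  | [], s => s
  | i :: rest, s =>
      if pvCell board y i == " " then s
      else pvLoopA board y rest (pvCell board y i ++ s)

def get_word_on_top (board : List (List String)) (start_point : Int × Int) : String :=
  pvLoopA board start_point.2 (PySem.List.pyRange start_point.1 (-1) (-1)) ""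

-- ===== PORT B =====
-- B's while loop 'while lo >= 0 and board[lo][y] != " ": lo -= 1', fueled by (lo+1).toNat:
-- pvFindLo n computes the final lo for initial lo = n - 1
def pvFindLo (board : List (List String)) (y : Int) : Nat → Int
  | 0 => -1
  | n + 1 => if pvCell board y (n : Int) == " " then (n : Int) else pvFindLo board y n

def get_word_on_top_alt (board : List (List String)) (start_point : Int × Int) : String :=
  let x := start_point.1
  let y := start_point.2
  let lo := pvFindLo board y (x + 1).toNat
  String.join ((PySem.List.pyRange (lo + 1) (x + 1) 1).map (pvCell board y))

-- ===== PRECONDITION & SPEC =====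
-- cell access as Python performs it: none exactly where board[i][y] raises IndexError
def pvCellOpt (board : List (List String)) (y i : Int) : Option String :=
  (PySem.List.pyGet? board i).bind (fun row => PySem.List.pyGet? row y)

-- Pre_ states exactly that A returns: every row i in 0..x that A's downward scan reaches (i.e.
-- all cells strictly above it up to x are readable and non-blank) must itself admit board[i][y];
-- excluded inputs are exactly those where A raises IndexError (B raises there too).
def Pre_get_word_on_top (board : List (List String)) (start_point : Int × Int) : Prop :=
  0 ≤ start_point.1 →
    start_point.1 < (board.length : Int) ∧
    ∀ i ∈ List.range (start_point.1.toNat + 1),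
      (∀ j ∈ List.range (start_point.1.toNat + 1), i < j →
          ((pvCellOpt board start_point.2 (j : Int)).any (fun c => c != " ")) = true) →
        (pvCellOpt board start_point.2 (i : Int)).isSome = true
instance (board : List (List String)) (start_point : Int × Int) : Decidable (Pre_get_word_on_top board start_point) := by unfold Pre_get_word_on_top; infer_instance

def pvWitness_get_word_on_top : List (List String) × (Int × Int) :=
  ([[" ", "C"], ["A", "T"]], (1, 1))

def Spec_get_word_on_top (board : List (List String)) (start_point : Int × Int) (out : String) : Prop := out = get_word_on_top_alt board start_point
instance (board : List (List String)) (start_point : Int × Int) (out : String) : Decidable (Spec_get_word_on_top board start_point out) := by unfold Spec_get_word_on_top; infer_instance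

-- ===== CLAIM (what is proved, stated in full; the proofs are below) =====
def Claim_equal_get_word_on_top : Prop := ∀ (board : List (List String)) (start_point : Int × Int), Dom_get_word_on_top board start_point → Pre_get_word_on_top board start_point → Spec_get_word_on_top board start_point (get_word_on_top board start_point)

-- ===== LEMMAS AND PROOFS =====

theorem pvFoldl_append_init (l : List String) (s : String) :
    l.foldl (· ++ ·) s = s ++ l.foldl (· ++ ·) "" := by
  induction l generalizing s with
  | nil => simp
  | cons a t ih =>
      simp only [List.foldl_cons]
      rw [ih (s ++ a), ih ("" ++ a)]
      simp [String.append_assoc]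

theorem pvJoin_append (xs ys : List String) :
    String.join (xs ++ ys) = String.join xs ++ String.join ys := by
  show (xs ++ ys).foldl (· ++ ·) "" = xs.foldl (· ++ ·) "" ++ ys.foldl (· ++ ·) ""
  rw [List.foldl_append, pvFoldl_append_init]

theorem pvFindLo_lt (board : List (List String)) (y : Int) (n : Nat) :
    pvFindLo board y n < (n : Int) := by
  induction n with
  | zero => norm_num [pvFindLo]
  | succ m ih =>
      simp only [pvFindLo]
      split
      · push_cast; omega
      · have := ih; push_cast; omega

-- A's break-loop over [n-1, …, 0] equals the join of the cells above the boundary pvFindLo n,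
-- plus the pending accumulator.
theorem pvLoopA_eq_join (board : List (List String)) (y : Int) :
    ∀ (n : Nat) (acc : String),
      pvLoopA board y (PySem.List.pyRange 0 (n : Int) 1).reverse acc =
        String.join ((PySem.List.pyRange (pvFindLo board y n + 1) (n : Int) 1).map
          (pvCell board y)) ++ acc := by
  intro n
  induction n with
  | zero =>
      intro acc
      simp [PySem.List.pyRange_one_eq_nil, pvLoopA, pvFindLo, String.join]
  | succ m ih =>
      intro acc
      have hsplit : PySem.List.pyRange 0 ((m : Int) + 1) 1 =
          PySem.List.pyRange 0 (m : Int) 1 ++ [(m : Int)] :=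
        PySem.List.pyRange_one_succ_right (by positivity)
      have hcast : ((m + 1 : Nat) : Int) = (m : Int) + 1 := by push_cast; ring
      rw [hcast, hsplit, List.reverse_append]
      simp only [List.reverse_cons, List.reverse_nil, List.nil_append, List.cons_append,
        pvLoopA, pvFindLo]
      by_cases h : (pvCell board y (m : Int) == " ") = true
      · rw [if_pos h, if_pos h, PySem.List.pyRange_one_eq_nil (by omega)]
        simp [String.join]
      · rw [if_neg h, if_neg h, ih]
        have hlt : pvFindLo board y m + 1 ≤ (m : Int) := by
          have := pvFindLo_lt board y m; omega
        rw [PySem.List.pyRange_one_succ_right hlt, List.map_append, pvJoin_append]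
        simp [String.join, String.append_assoc]

theorem get_word_on_top_spec : Claim_equal_get_word_on_top := by
  intro board start_point _ _
  unfold Spec_get_word_on_top get_word_on_top get_word_on_top_alt
  obtain ⟨x, y⟩ := start_point
  simp only
  by_cases hx : -1 ≤ x
  · have hn : ((x + 1).toNat : Int) = x + 1 := by omega
    rw [PySem.List.pyRange_neg_one_eq_reverse]
    have h0 : (-1 : Int) + 1 = 0 := by norm_num
    rw [h0, ← hn, pvLoopA_eq_join board y (x + 1).toNat "", hn, String.append_empty]
  · rw [PySem.List.pyRange_neg_one_eq_nil (by omega)]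
    have hl : pvFindLo board y (x + 1).toNat = -1 := by
      have : (x + 1).toNat = 0 := by omega
      rw [this]; rfl
    rw [hl, PySem.List.pyRange_one_eq_nil (by omega)]
    simp [pvLoopA, String.join]
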